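-- pv_equiv track=rewrite | github.com/rmb707/RhymeLM | rhymelm/rag/schemes.py | classify_window
-- ===== SOURCE A (Python) =====
-- def classify_window(suffixes: list[str | None]) -> str:
--     """Classify a 4-line window's rhyme pattern from its ending suffixes.
--
--     Returns one of: AABB, ABAB, ABBA, AAAA, irregular, unknown.
--     Returns "unknown" when any suffix is None (out-of-vocab word).
--     """
--     if len(suffixes) < 4 or any(s is None for s in suffixes):
--         return "unknown"
--
--     s0, s1, s2, s3 = suffixes[0], suffixes[1], suffixes[2], suffixes[3]
--
--     if s0 == s1 == s2 == s3:
--         return "AAAA"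
--     if s0 == s1 and s2 == s3 and s0 != s2:
--         return "AABB"
--     if s0 == s2 and s1 == s3 and s0 != s1:
--         return "ABAB"
--     if s0 == s3 and s1 == s2 and s0 != s1:
--         return "ABBA"
--     return "irregular"
-- ===== SOURCE B (Python) =====
-- def classify_window(suffixes):
--     if len(suffixes) < 4 or any(s is None for s in suffixes):
--         return "unknown"
--     labels = {}
--     pattern = ""
--     for s in suffixes[:4]:
--         if s not in labels:
--             labels[s] = chr(ord("A") + len(labels))
--         pattern += labels[s]
--     return pattern if pattern in {"AAAA", "AABB", "ABAB", "ABBA"} else "irregular"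
-- ===== Notes on version B (the rewrite author's own statement) =====
-- stated objective: simpler
-- what changed: Replaces the cascade of pairwise equality/inequality tests by first-occurrence canonical labeling of the first four suffixes followed by one membership test against the four named schemes.
import Mathlib
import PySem

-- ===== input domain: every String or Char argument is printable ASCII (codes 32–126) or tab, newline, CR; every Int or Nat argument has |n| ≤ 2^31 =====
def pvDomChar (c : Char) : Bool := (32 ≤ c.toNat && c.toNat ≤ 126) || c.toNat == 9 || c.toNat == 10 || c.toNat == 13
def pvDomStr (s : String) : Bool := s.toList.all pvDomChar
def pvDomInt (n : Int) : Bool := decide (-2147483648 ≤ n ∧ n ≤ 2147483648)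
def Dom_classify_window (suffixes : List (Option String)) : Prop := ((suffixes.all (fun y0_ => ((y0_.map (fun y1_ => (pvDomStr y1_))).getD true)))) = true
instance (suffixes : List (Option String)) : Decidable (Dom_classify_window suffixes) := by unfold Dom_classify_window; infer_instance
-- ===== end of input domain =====

-- ===== PORT A =====
-- B: first-occurrence canonical labeling of the first four suffixes + one membership test, instead of A's equality cascade (simpler decomposition, same cost).
def classify_window (suffixes : List (Option String)) : String :=
  if suffixes.length < 4 ∨ suffixes.any Option.isNone then "unknown"
  else
    let s0 := suffixes.getD 0 none
    let s1 := suffixes.getD 1 none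
    let s2 := suffixes.getD 2 none
    let s3 := suffixes.getD 3 none
    if s0 = s1 ∧ s1 = s2 ∧ s2 = s3 then "AAAA"
    else if s0 = s1 ∧ s2 = s3 ∧ s0 ≠ s2 then "AABB"
    else if s0 = s2 ∧ s1 = s3 ∧ s0 ≠ s1 then "ABAB"
    else if s0 = s3 ∧ s1 = s2 ∧ s0 ≠ s1 then "ABBA"
    else "irregular"

-- ===== PORT B =====
-- the labeling loop of Source B: dict suffix→letter, emit the letter of each of the first four suffixes
def cwLoop (xs : List (Option String)) (labels : PySem.Dict (Option String) String) (pattern : String) : String :=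
  match xs with
  | [] => pattern
  | s :: rest =>
    let labels := if labels.contains s then labels
                  else labels.insert s (String.ofList [Char.ofNat (65 + labels.size)])
    cwLoop rest labels (pattern ++ labels.getD s "")

def classify_window_alt (suffixes : List (Option String)) : String :=
  if suffixes.length < 4 ∨ suffixes.any Option.isNone then "unknown"
  else
    let pattern := cwLoop (PySem.List.slice suffixes none (some 4)) PySem.Dict.empty ""
    if pattern ∈ ["AAAA", "AABB", "ABAB", "ABBA"] then pattern else "irregular"

-- ===== PRECONDITION & SPEC =====
def Spec_classify_window (suffixes : List (Option String)) (out : String) : Prop := out = classify_window_alt suffixes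
instance (suffixes : List (Option String)) (out : String) : Decidable (Spec_classify_window suffixes out) := by unfold Spec_classify_window; infer_instance

-- ===== CLAIM (what is proved, stated in full; the proofs are below) =====
def Claim_equal_classify_window : Prop := ∀ (suffixes : List (Option String)), Dom_classify_window suffixes → Spec_classify_window suffixes (classify_window suffixes)

-- ===== LEMMAS AND PROOFS =====
theorem lemA : String.ofList [Char.ofNat (65)] = "A" := rfl
theorem lemB : String.ofList [Char.ofNat (66)] = "B" := rfl
theorem lemC : String.ofList [Char.ofNat (67)] = "C" := rfl
theorem lemD : String.ofList [Char.ofNat (68)] = "D" := rfl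

-- ===== VERDICT (by name: the statement is the Claim_ definition above) =====
set_option maxHeartbeats 2000000 in
theorem classify_window_spec : Claim_equal_classify_window := by
  intro suffixes _
  unfold Spec_classify_window classify_window classify_window_alt
  match suffixes with
  | [] => simp
  | [_] => simp
  | [_, _] => simp
  | [_, _, _] => simp
  | a :: b :: c :: d :: rest =>
    by_cases hn : (a :: b :: c :: d :: rest).any Option.isNone
    · simp [hn]
    · simp only [List.any_cons, Bool.or_eq_true, List.any_eq_true] at hn
      push Not at hn
      obtain ⟨ha, hb, hc, hd, hr⟩ := hn
      obtain ⟨x0, rfl⟩ : ∃ x, a = some x := by cases a <;> simp_all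
      obtain ⟨x1, rfl⟩ : ∃ x, b = some x := by cases b <;> simp_all
      obtain ⟨x2, rfl⟩ : ∃ x, c = some x := by cases c <;> simp_all
      obtain ⟨x3, rfl⟩ : ∃ x, d = some x := by cases d <;> simp_all
      have hg : ¬((some x0 :: some x1 :: some x2 :: some x3 :: rest).length < 4 ∨
          (some x0 :: some x1 :: some x2 :: some x3 :: rest).any Option.isNone) := by
        simp only [List.length_cons, List.any_cons, Bool.or_eq_true, List.any_eq_true]
        push Not
        refine ⟨by omega, by simp, by simp, by simp, by simp, ?_⟩
        intro x hx
        cases x with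
        | none => exact absurd rfl (hr none hx)
        | some y => simp
      rw [if_neg hg, if_neg hg]
      rw [show (4 : Int) = ((4 : Nat) : Int) from rfl, PySem.List.slice_to_natCast]
      simp only [List.take_succ_cons, List.take_zero]
      by_cases h01 : x0 = x1 <;> by_cases h02 : x0 = x2 <;> by_cases h03 : x0 = x3 <;>
        by_cases h12 : x1 = x2 <;> by_cases h13 : x1 = x3 <;> by_cases h23 : x2 = x3 <;>
        simp_all [cwLoop, PySem.Dict.empty, PySem.Dict.size, PySem.Dict.insert,
          PySem.Dict.contains, PySem.Dict.getD, PySem.Dict.get?,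
          lemA, lemB, lemC, lemD]
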